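-- pv_equiv track=rewrite | github.com/timwiddo/Python-Tasks | Task 6 Solution.py | binary_search_next_unique
-- ===== SOURCE A (Python) =====
-- def binary_search_next_unique(L, start): #Hilfsfunktion um k log n zu gewährleisten
--
--
--      # L: Eine aufsteigend sortierte Liste
--      # start: Der Startindex für die Suche
--      # return: Der Index des nächsten einzigartigen Elements
--
--     links, rechts = start, len(L) - 1
--     while links <= rechts:
--         mitte = (links + rechts) // 2
--         if L[mitte] == L[start]:
--             links = mitte + 1
--         else:
--             rechts = mitte - 1
--
--     return links if links < len(L) else None #wenn links noch in L liegt gib es zurück andernfalls wars das mit der suche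
-- ===== SOURCE B (Python) =====
-- def binary_search_next_unique(L, start):
--     # Recursive divide-and-conquer: the final bounds check lives in the base case,
--     # the pivot value is read once; identical index arithmetic, so it matches A
--     # on sorted and unsorted input alike.
--     if start >= len(L):
--         return None
--     target = L[start]
--
--     def search(lo, hi):
--         if lo > hi:
--             return lo if lo < len(L) else None
--         mid = (lo + hi) // 2
--         if L[mid] != target:
--             return search(lo, mid - 1)
--         return search(mid + 1, hi)
--
--     return search(start, len(L) - 1)
-- ===== Notes on version B (the rewrite author's own statement) =====
-- stated objective: alternative
-- what changed: Replaces the while-loop mutating links/rechts with a recursive divide-and-conquer helper whose base case itself returns the Option result (the lo<len(L) check moves into the recursion), hoists the pivot L[start] out of the iteration, negates and swaps the comparison branches, and adds an early None return for start>=len(L).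
import Mathlib
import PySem

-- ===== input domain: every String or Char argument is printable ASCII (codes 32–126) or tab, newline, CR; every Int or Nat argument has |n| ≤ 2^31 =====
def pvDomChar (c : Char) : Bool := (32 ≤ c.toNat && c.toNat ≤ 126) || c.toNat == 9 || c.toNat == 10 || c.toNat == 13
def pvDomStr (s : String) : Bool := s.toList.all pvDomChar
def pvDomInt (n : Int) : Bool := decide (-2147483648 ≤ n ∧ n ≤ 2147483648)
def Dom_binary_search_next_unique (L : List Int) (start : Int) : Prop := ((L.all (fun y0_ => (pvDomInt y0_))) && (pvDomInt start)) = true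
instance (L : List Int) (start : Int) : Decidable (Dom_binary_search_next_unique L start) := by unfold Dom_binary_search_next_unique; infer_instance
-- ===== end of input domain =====

-- B recasts A's iterative while-loop as a recursive divide-and-conquer helper whose base
-- case returns the Option result directly, with the pivot L[start] read once; same index
-- arithmetic, same results.

-- ===== PORT A =====
-- A's while-loop over mutable state (links, rechts); fuel is only a totality guard
-- (the interval shrinks every iteration, so the chosen fuel never runs out).
def pvLoopA (L : List Int) (start : Int) (fuel : Nat) (links rechts : Int) : Int :=
  match fuel with
  | 0 => links
  | fuel + 1 =>
    if links ≤ rechts then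
      let mitte := PySem.Int.floordiv (links + rechts) 2
      -- L[mitte] == L[start]: exact on Pre_ (both indices in Python range there)
      if PySem.List.pyGet? L mitte = PySem.List.pyGet? L start then
        pvLoopA L start fuel (mitte + 1) rechts
      else
        pvLoopA L start fuel links (mitte - 1)
    else links

def binary_search_next_unique (L : List Int) (start : Int) : Option Int :=
  let links := pvLoopA L start (((L.length : Int) - start).toNat + 1) start ((L.length : Int) - 1)
  if links < (L.length : Int) then some links else none

-- ===== PORT B =====
-- B's inner recursive helper, well-founded on the interval width; the base case
-- already produces the Option answer.
def pvSearchB (L : List Int) (target : Option Int) (lo hi : Int) : Option Int :=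
  if h : lo > hi then (if lo < (L.length : Int) then some lo else none)
  else
    let mid := PySem.Int.floordiv (lo + hi) 2
    if PySem.List.pyGet? L mid ≠ target then pvSearchB L target lo (mid - 1)
    else pvSearchB L target (mid + 1) hi
termination_by (hi - lo + 1).toNat
decreasing_by
  all_goals
    have hb := PySem.Int.floordiv_two_mid_bounds (show lo ≤ hi by omega)
    omega

def binary_search_next_unique_alt (L : List Int) (start : Int) : Option Int :=
  if start ≥ (L.length : Int) then none
  else
    -- target = L[start]: exact on Pre_ (there pyGet? is some)
    pvSearchB L (PySem.List.pyGet? L start) start ((L.length : Int) - 1)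

-- ===== PRECONDITION & SPEC =====
-- Pre_ excludes exactly the inputs where A raises IndexError: start < -len(L)
-- (then the loop is entered and L[start] is out of Python's index range).
def Pre_binary_search_next_unique (L : List Int) (start : Int) : Prop :=
  -(L.length : Int) ≤ start
instance (L : List Int) (start : Int) : Decidable (Pre_binary_search_next_unique L start) := by
  unfold Pre_binary_search_next_unique; infer_instance

def pvWitness_binary_search_next_unique : List Int × Int := ([1, 1, 2, 3], 0)

def Spec_binary_search_next_unique (L : List Int) (start : Int) (out : Option Int) : Prop := out = binary_search_next_unique_alt L start
instance (L : List Int) (start : Int) (out : Option Int) : Decidable (Spec_binary_search_next_unique L start out) := by unfold Spec_binary_search_next_unique; infer_instance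

-- ===== CLAIM (what is proved, stated in full; the proofs are below) =====
def Claim_equal_binary_search_next_unique : Prop := ∀ (L : List Int) (start : Int), Dom_binary_search_next_unique L start → Pre_binary_search_next_unique L start → Spec_binary_search_next_unique L start (binary_search_next_unique L start)

-- ===== LEMMAS AND PROOFS =====

-- With enough fuel, A's loop followed by its final bounds check computes exactly
-- B's recursion for the fixed pivot.
theorem pvLoop_eq_search (L : List Int) (start : Int) :
    ∀ (fuel : Nat) (lo hi : Int), (hi - lo + 1).toNat ≤ fuel →
      (if pvLoopA L start fuel lo hi < (L.length : Int)
        then some (pvLoopA L start fuel lo hi) else none)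
        = pvSearchB L (PySem.List.pyGet? L start) lo hi := by
  intro fuel
  induction fuel with
  | zero =>
      intro lo hi hf
      have hlt : lo > hi := by omega
      rw [pvSearchB, dif_pos hlt]
      simp [pvLoopA]
  | succ fuel ih =>
      intro lo hi hf
      by_cases h : lo ≤ hi
      · have hb := PySem.Int.floordiv_two_mid_bounds h
        simp only [pvLoopA, if_pos h]
        rw [pvSearchB, dif_neg (by omega : ¬ lo > hi)]
        by_cases heq : PySem.List.pyGet? L (PySem.Int.floordiv (lo + hi) 2)
            = PySem.List.pyGet? L start
        · rw [if_pos heq, if_neg (not_not_intro heq)]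
          exact ih _ _ (by omega)
        · rw [if_neg heq, if_pos heq]
          exact ih _ _ (by omega)
      · simp only [pvLoopA, if_neg h]
        rw [pvSearchB, dif_pos (by omega : lo > hi)]

-- ===== VERDICT (by name: the statement is the Claim_ definition above) =====
theorem binary_search_next_unique_spec : Claim_equal_binary_search_next_unique := by
  intro L start _ _
  unfold Spec_binary_search_next_unique binary_search_next_unique binary_search_next_unique_alt
  by_cases hs : start ≥ (L.length : Int)
  · -- the loop body never runs: pvLoopA returns start, and start ≥ len ⇒ A gives none too
    rw [if_pos hs]
    have h0 : ((L.length : Int) - start).toNat + 1 = 0 + 1 := by omega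
    rw [h0]
    simp only [pvLoopA, if_neg (by omega : ¬ start ≤ (L.length : Int) - 1)]
    rw [if_neg (by omega)]
  · rw [if_neg hs]
    exact pvLoop_eq_search L start _ start ((L.length : Int) - 1) (by omega)
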